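-- pv_equiv track=rewrite | github.com/xodnjs8287/viral-food-map | crawler/database.py | _prepare_keyword_names
-- ===== SOURCE A (Python) =====
-- def _prepare_keyword_names(keywords: list[str]) -> list[str]:
--     return sorted(
--         {
--             str(keyword or "").strip()
--             for keyword in keywords
--             if str(keyword or "").strip()
--         }
--     )
-- ===== SOURCE B (Python) =====
-- def _prepare_keyword_names(keywords):
--     out = []
--     for keyword in keywords:
--         t = str(keyword or "").strip()
--         if not t:
--             continue
--         i = 0
--         while i < len(out) and out[i] < t:
--             i += 1
--         if i == len(out) or out[i] != t:
--             out.insert(i, t)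
--     return out
-- ===== Notes on version B (the rewrite author's own statement) =====
-- stated objective: alternative
-- what changed: Replaces set-dedup-then-sort with a single pass that maintains a strictly sorted duplicate-free list by ordered insertion (scan to the insertion point, skip if already present), using neither a set nor a sort call.
import Mathlib
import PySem

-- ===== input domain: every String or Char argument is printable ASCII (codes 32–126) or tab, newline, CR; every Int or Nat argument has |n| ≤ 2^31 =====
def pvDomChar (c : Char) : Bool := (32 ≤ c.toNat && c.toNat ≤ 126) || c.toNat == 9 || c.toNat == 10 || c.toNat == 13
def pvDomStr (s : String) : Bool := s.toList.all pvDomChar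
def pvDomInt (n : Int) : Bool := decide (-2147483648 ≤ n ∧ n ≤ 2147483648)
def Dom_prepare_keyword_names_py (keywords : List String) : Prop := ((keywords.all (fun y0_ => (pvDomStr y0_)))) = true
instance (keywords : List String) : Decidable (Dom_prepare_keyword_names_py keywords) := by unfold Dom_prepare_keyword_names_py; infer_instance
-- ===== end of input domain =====

-- B makes one pass over the keywords, keeping a strictly sorted duplicate-free list by
-- ordered insertion (scan to the insertion point, skip if present): no set, no sort call.


-- ===== PORT A =====
-- str(keyword or "").strip(); on a string argument `keyword or ""` is "" iff keyword is ""
def pvStripKw (keyword : String) : String :=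
  PySem.Str.strip (if keyword = "" then "" else keyword)

-- set comprehension (fold of conditional adds), then sorted
def prepare_keyword_names_py (keywords : List String) : List String :=
  PySem.List.sorted
    (keywords.foldl
      (fun acc keyword =>
        if pvStripKw keyword ≠ "" then PySem.Set.add acc (pvStripKw keyword) else acc)
      PySem.Set.empty)
    (fun x => x) false

-- ===== PORT B =====
-- the while-scan to the insertion point followed by out.insert(i, t) / skip-if-equal
def pvInsOrd (l : List String) (t : String) : List String :=
  match l with
  | [] => [t]
  | x :: rest => if x < t then x :: pvInsOrd rest t else if x = t then x :: rest else t :: x :: rest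

def pvStepB (out : List String) (keyword : String) : List String :=
  let t := pvStripKw keyword
  if t ≠ "" then pvInsOrd out t else out

def prepare_keyword_names_py_alt (keywords : List String) : List String :=
  keywords.foldl pvStepB []

-- ===== PRECONDITION & SPEC =====
def Spec_prepare_keyword_names_py (keywords : List String) (out : List String) : Prop := out = prepare_keyword_names_py_alt keywords
instance (keywords : List String) (out : List String) : Decidable (Spec_prepare_keyword_names_py keywords out) := by unfold Spec_prepare_keyword_names_py; infer_instance

-- ===== CLAIM (what is proved, stated in full; the proofs are below) =====
def Claim_equal_prepare_keyword_names_py : Prop := ∀ (keywords : List String), Dom_prepare_keyword_names_py keywords → Spec_prepare_keyword_names_py keywords (prepare_keyword_names_py keywords)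

-- ===== LEMMAS AND PROOFS =====

-- A's conditional-add fold equals building the set from the filtered stripped list
theorem pvFoldA_eq (ks : List String) (s : List String) :
    ks.foldl
      (fun acc keyword =>
        if pvStripKw keyword ≠ "" then PySem.Set.add acc (pvStripKw keyword) else acc) s
    = ((ks.map pvStripKw).filter (fun t => t ≠ "")).foldl PySem.Set.add s := by
  induction ks generalizing s with
  | nil => rfl
  | cons k ks ih =>
    by_cases h : pvStripKw k = ""
    · simpa [List.foldl_cons, h] using ih s
    · simpa [List.foldl_cons, h] using ih (PySem.Set.add s (pvStripKw k))

theorem pvMem_insOrd (l : List String) (t y : String) :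
    y ∈ pvInsOrd l t ↔ y = t ∨ y ∈ l := by
  induction l with
  | nil => simp [pvInsOrd]
  | cons x rest ih =>
    simp only [pvInsOrd]
    split_ifs with h1 h2
    · rw [List.mem_cons, ih, List.mem_cons]; tauto
    · subst h2; simp only [List.mem_cons]; tauto
    · simp only [List.mem_cons]

theorem pvPairwise_insOrd {l : List String} (t : String) (hl : l.Pairwise (· < ·)) :
    (pvInsOrd l t).Pairwise (· < ·) := by
  induction l with
  | nil => simp [pvInsOrd]
  | cons x rest ih =>
    rcases List.pairwise_cons.mp hl with ⟨hx, hrest⟩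
    simp only [pvInsOrd]
    split_ifs with h1 h2
    · refine List.pairwise_cons.mpr ⟨?_, ih hrest⟩
      intro y hy
      rcases (pvMem_insOrd rest t y).mp hy with rfl | hy'
      · exact h1
      · exact hx y hy'
    · exact hl
    · have ht : t < x := lt_of_le_of_ne (le_of_not_gt h1) (fun h => h2 h.symm)
      refine List.pairwise_cons.mpr ⟨?_, hl⟩
      intro y hy
      rcases List.mem_cons.mp hy with rfl | hy'
      · exact ht
      · exact lt_trans ht (hx y hy')

-- B's fold: strictly sorted invariant
theorem pvStepB_eq_pos (out : List String) (k : String) (h : pvStripKw k ≠ "") :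
    pvStepB out k = pvInsOrd out (pvStripKw k) := by simp [pvStepB, h]

theorem pvStepB_eq_neg (out : List String) (k : String) (h : pvStripKw k = "") :
    pvStepB out k = out := by simp [pvStepB, h]

theorem pvFoldB_pairwise (ks : List String) (acc : List String)
    (hacc : acc.Pairwise (· < ·)) :
    (ks.foldl pvStepB acc).Pairwise (· < ·) := by
  induction ks generalizing acc with
  | nil => exact hacc
  | cons k ks ih =>
    rw [List.foldl_cons]
    by_cases h : pvStripKw k = ""
    · rw [pvStepB_eq_neg acc k h]; exact ih acc hacc
    · rw [pvStepB_eq_pos acc k h]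
      exact ih _ (pvPairwise_insOrd _ hacc)

-- B's fold: membership = acc ∪ the stripped non-empty keywords
theorem pvFoldB_mem (ks : List String) (acc : List String) (y : String) :
    y ∈ ks.foldl pvStepB acc
    ↔ y ∈ acc ∨ y ∈ (ks.map pvStripKw).filter (fun t => t ≠ "") := by
  induction ks generalizing acc with
  | nil => simp
  | cons k ks ih =>
    rw [List.foldl_cons]
    by_cases h : pvStripKw k = ""
    · rw [pvStepB_eq_neg acc k h, ih]
      simp [h]
    · rw [pvStepB_eq_pos acc k h, ih, pvMem_insOrd]
      simp only [List.map_cons, List.filter_cons]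
      rw [if_pos (by simpa using h)]
      simp only [List.mem_cons]
      rw [or_assoc]
      exact or_left_comm

-- ===== VERDICT (by name: the statement is the Claim_ definition above) =====
theorem prepare_keyword_names_py_spec : Claim_equal_prepare_keyword_names_py := by
  intro keywords _
  unfold Spec_prepare_keyword_names_py prepare_keyword_names_py prepare_keyword_names_py_alt
  set R : List String := (keywords.map pvStripKw).filter (fun t => t ≠ "") with hR
  have hA : keywords.foldl
      (fun acc keyword =>
        if pvStripKw keyword ≠ "" then PySem.Set.add acc (pvStripKw keyword) else acc)
      PySem.Set.empty = PySem.Set.ofList R := by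
    rw [pvFoldA_eq]; rfl
  rw [hA]
  set L := keywords.foldl pvStepB [] with hL
  have hpw : L.Pairwise (· < ·) := pvFoldB_pairwise keywords [] (by simp)
  have hnd : L.Nodup := hpw.imp ne_of_lt
  have hperm : L.Perm (PySem.Set.ofList R) := by
    refine (List.perm_ext_iff_of_nodup hnd (PySem.Set.nodup_ofList R)).mpr ?_
    intro y
    rw [PySem.Set.mem_ofList, hL, pvFoldB_mem]
    simp [hR]
  exact (PySem.List.sorted_eq_of_perm_of_pairwise_lt _ _ (fun x => x) hperm hpw)
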